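-- pv_equiv track=rewrite | github.com/augusyan/mahjong | feature_extract_v5.py | ac
-- ===== SOURCE A (Python) =====
-- def ac(handcards):
--     feature=[
--          0,
--          0,
--          0,
--          0,
--          0,
--          0,
--          0,
--          0,
--          0,
--          0,
--          0,
--          0,
--          0,
--          0,
--          0,
--          0,
--          0,
--          0,
--          0,
--          0,
--          0,
--     ]
--     k = 0
--     while k <= len(handcards) - 2:
--         num = handcards[k] & 0x0F
--         # 万 ac【0-6】
--         if handcards[k] & 0xF0 == 0x00 and handcards[k] + 2 in handcards:
--             feature[num-1] += 1
--         # 条 【7-13】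
--
--         elif handcards[k] & 0xF0 == 0x10 and handcards[k] + 2 in handcards:
--             #print handcards
--             feature[6+ num] += 1
--         # 筒 【14-20】
--         elif handcards[k] & 0xF0 == 0x20 and handcards[k] + 2 in handcards:
--             feature[13+ num] += 1
--         k += 1
--     #print  feature
--     return feature
-- ===== SOURCE B (Python) =====
-- def ac(handcards):
--     # Frequency-table pass: count occurrences of each tile in handcards[:-1] once,
--     # then one pass over distinct tiles adds the whole count to its feature slot.
--     present = set(handcards)
--     cnt = {}
--     for t in handcards[:-1]:
--         cnt[t] = cnt.get(t, 0) + 1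
--     feature = [0] * 21
--     for t, c in cnt.items():
--         if t + 2 in present:
--             suit = t & 0xF0
--             num = t & 0x0F
--             if suit == 0x00:
--                 feature[num - 1] += c
--             elif suit == 0x10:
--                 feature[6 + num] += c
--             elif suit == 0x20:
--                 feature[13 + num] += c
--     return feature
-- ===== Notes on version B (the rewrite author's own statement) =====
-- stated objective: faster
-- what changed: Replaces the per-position loop with an O(n) membership scan inside it by building a set of all tiles and a frequency dict of handcards[:-1] once, then a single pass over distinct tiles adding each tile's whole occurrence count to its feature slot.
import Mathlib
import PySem

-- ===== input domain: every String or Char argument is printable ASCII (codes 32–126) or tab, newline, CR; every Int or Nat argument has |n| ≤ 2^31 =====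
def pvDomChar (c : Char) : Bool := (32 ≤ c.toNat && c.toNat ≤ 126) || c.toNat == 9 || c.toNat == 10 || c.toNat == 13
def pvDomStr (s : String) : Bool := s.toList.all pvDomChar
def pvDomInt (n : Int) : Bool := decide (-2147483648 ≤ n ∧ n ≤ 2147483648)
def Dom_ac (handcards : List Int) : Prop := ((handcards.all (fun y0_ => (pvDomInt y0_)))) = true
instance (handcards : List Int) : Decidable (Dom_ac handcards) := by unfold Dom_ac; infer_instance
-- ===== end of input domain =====

-- B replaces A's per-position loop (with a linear membership scan inside) by a set of all
-- tiles plus a frequency dict of handcards[:-1], then one pass over distinct tiles,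
-- intended to be faster on large hands.

-- ===== PORT A =====
-- feature[i] += 1 (Python index semantics: negative wrap; pySetD/pyGetD are exact under Pre_,
-- which puts every reached index in range)
def acInc (feature : List Int) (i : Int) : List Int :=
  PySem.List.pySetD feature i (PySem.List.pyGetD feature i 0 + 1)

-- the while-loop of A, k increasing while k <= len(handcards) - 2 (fuel = an upper bound
-- on the remaining iterations, so the loop is exact: the guard is re-checked every step)
def acLoop (handcards : List Int) (feature : List Int) (k : Nat) : Nat → List Int
  | 0 => feature
  | fuel + 1 =>
    if (k : Int) ≤ (handcards.length : Int) - 2 then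
      let t := PySem.List.pyGetD handcards (k : Int) 0
      let num := PySem.Int.band t 0x0F
      let feature' :=
        if PySem.Int.band t 0xF0 = 0x00 ∧ (t + 2) ∈ handcards then acInc feature (num - 1)
        else if PySem.Int.band t 0xF0 = 0x10 ∧ (t + 2) ∈ handcards then acInc feature (6 + num)
        else if PySem.Int.band t 0xF0 = 0x20 ∧ (t + 2) ∈ handcards then acInc feature (13 + num)
        else feature
      acLoop handcards feature' (k + 1) fuel
    else feature

def ac (handcards : List Int) : List Int :=
  acLoop handcards [0, 0, 0, 0, 0, 0, 0, 0, 0, 0, 0, 0, 0, 0, 0, 0, 0, 0, 0, 0, 0] 0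
    handcards.length

-- ===== PORT B =====
-- feature[i] += c
def altInc (feature : List Int) (i : Int) (c : Int) : List Int :=
  PySem.List.pySetD feature i (PySem.List.pyGetD feature i 0 + c)

def ac_alt (handcards : List Int) : List Int :=
  let present : PySem.Set Int := PySem.Set.ofList handcards
  let cnt : PySem.Dict Int Int :=
    (PySem.List.slice handcards none (some (-1))).foldl
      (fun d t => d.insert t (d.getD t 0 + 1)) PySem.Dict.empty
  cnt.items.foldl
    (fun feature p =>
      if PySem.Set.contains present (p.1 + 2) then
        let suit := PySem.Int.band p.1 0xF0
        let num := PySem.Int.band p.1 0x0F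
        if suit = 0x00 then altInc feature (num - 1) p.2
        else if suit = 0x10 then altInc feature (6 + num) p.2
        else if suit = 0x20 then altInc feature (13 + num) p.2
        else feature
      else feature)
    (List.replicate 21 0)

-- ===== PRECONDITION & SPEC =====
-- Pre_ excludes exactly the inputs on which A raises IndexError: a tile before the last card
-- whose value+2 is present and whose feature index would be 21 or more (条 with num 15, or
-- 筒 with num ≥ 8).
def Pre_ac (handcards : List Int) : Prop :=
  ∀ t ∈ handcards.dropLast, (t + 2) ∈ handcards →
    ¬(PySem.Int.band t 0xF0 = 0x10 ∧ PySem.Int.band t 0x0F = 15) ∧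
    ¬(PySem.Int.band t 0xF0 = 0x20 ∧ 8 ≤ PySem.Int.band t 0x0F)
instance (handcards : List Int) : Decidable (Pre_ac handcards) := by unfold Pre_ac; infer_instance

def pvWitness_ac : List Int := [1, 3, 2]

def Spec_ac (handcards : List Int) (out : List Int) : Prop := out = ac_alt handcards
instance (handcards : List Int) (out : List Int) : Decidable (Spec_ac handcards out) := by unfold Spec_ac; infer_instance

-- ===== CLAIM (what is proved, stated in full; the proofs are below) =====
def Claim_equal_ac : Prop := ∀ (handcards : List Int), Dom_ac handcards → Pre_ac handcards → Spec_ac handcards (ac handcards)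

-- ===== LEMMAS AND PROOFS =====

-- the common per-tile step, weighted by c
def pvStep (h : List Int) (f : List Int) (t : Int) (c : Int) : List Int :=
  if (t + 2) ∈ h then
    if PySem.Int.band t 0xF0 = 0x00 then altInc f (PySem.Int.band t 0x0F - 1) c
    else if PySem.Int.band t 0xF0 = 0x10 then altInc f (6 + PySem.Int.band t 0x0F) c
    else if PySem.Int.band t 0xF0 = 0x20 then altInc f (13 + PySem.Int.band t 0x0F) c
    else f
  else f

lemma pyIdx?_lt {n : Nat} {i : Int} {p : Nat} (h : PySem.List.pyIdx? n i = some p) : p < n := by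
  unfold PySem.List.pyIdx? at h
  split_ifs at h <;> simp_all <;> omega

lemma altInc_some (f : List Int) (i c : Int) {p : Nat} (hp : PySem.List.pyIdx? f.length i = some p) :
    altInc f i c = f.set p (f.getD p 0 + c) := by
  have hlt := pyIdx?_lt hp
  unfold altInc PySem.List.pySetD PySem.List.pySet? PySem.List.pyGetD PySem.List.pyGet?
  rw [hp]
  simp [List.getElem?_eq_getElem hlt]

lemma altInc_none (f : List Int) (i c : Int) (hp : PySem.List.pyIdx? f.length i = none) :
    altInc f i c = f := by
  unfold altInc PySem.List.pySetD PySem.List.pySet?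
  rw [hp]; rfl

lemma length_altInc (f : List Int) (i c : Int) : (altInc f i c).length = f.length := by
  cases hp : PySem.List.pyIdx? f.length i with
  | none => rw [altInc_none f i c hp]
  | some p => rw [altInc_some f i c hp]; simp

lemma getD_set_self (f : List Int) (p : Nat) (v : Int) (h : p < f.length) :
    (f.set p v).getD p 0 = v := by
  rw [List.getD_eq_getElem _ 0 (by simpa using h)]
  simp [List.getElem_set_self]

lemma getD_set_ne (f : List Int) (p q : Nat) (v : Int) (h : p ≠ q) :
    (f.set p v).getD q 0 = f.getD q 0 := by
  by_cases hq : q < f.length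
  · rw [List.getD_eq_getElem _ 0 (by simpa using hq), List.getD_eq_getElem _ 0 hq]
    exact List.getElem_set_ne (by omega) _
  · rw [List.getD_eq_default _ 0 (by simpa using Nat.le_of_not_lt hq),
        List.getD_eq_default _ 0 (Nat.le_of_not_lt hq)]

lemma altInc_split (f : List Int) (i c d : Int) :
    altInc (altInc f i c) i d = altInc f i (c + d) := by
  cases hp : PySem.List.pyIdx? f.length i with
  | none =>
    rw [altInc_none f i c hp, altInc_none f i d hp, altInc_none f i (c+d) hp]
  | some p =>
    have hlt := pyIdx?_lt hp
    have hp2 : PySem.List.pyIdx? (altInc f i c).length i = some p := by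
      rw [length_altInc]; exact hp
    rw [altInc_some _ i d hp2, altInc_some f i c hp, altInc_some f i (c+d) hp,
        getD_set_self f p _ hlt, List.set_set]
    ring_nf

lemma altInc_comm (f : List Int) (i j c d : Int) :
    altInc (altInc f i c) j d = altInc (altInc f j d) i c := by
  cases hpi : PySem.List.pyIdx? f.length i with
  | none =>
    rw [altInc_none f i c hpi, altInc_none _ i c (by rw [length_altInc]; exact hpi)]
  | some p =>
    cases hpj : PySem.List.pyIdx? f.length j with
    | none =>
      rw [altInc_none f j d hpj, altInc_none _ j d (by rw [length_altInc]; exact hpj)]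
    | some q =>
      have hpi2 : PySem.List.pyIdx? (altInc f j d).length i = some p := by
        rw [length_altInc]; exact hpi
      have hpj2 : PySem.List.pyIdx? (altInc f i c).length j = some q := by
        rw [length_altInc]; exact hpj
      by_cases hpq : p = q
      · subst hpq
        rw [altInc_some _ j d hpj2, altInc_some f i c hpi, getD_set_self f p _ (pyIdx?_lt hpi),
            altInc_some _ i c hpi2, altInc_some f j d hpj, getD_set_self f p _ (pyIdx?_lt hpi),
            List.set_set, List.set_set]
        ring_nf
      · rw [altInc_some _ j d hpj2, altInc_some f i c hpi, getD_set_ne f p q _ hpq,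
            altInc_some _ i c hpi2, altInc_some f j d hpj, getD_set_ne f q p _ (Ne.symm hpq),
            List.set_comm _ _ hpq]

lemma pvStep_split (h f : List Int) (t c d : Int) :
    pvStep h (pvStep h f t c) t d = pvStep h f t (c + d) := by
  unfold pvStep
  split_ifs <;> simp [altInc_split]

lemma pvStep_comm (h f : List Int) (t₁ c₁ t₂ c₂ : Int) :
    pvStep h (pvStep h f t₁ c₁) t₂ c₂ = pvStep h (pvStep h f t₂ c₂) t₁ c₁ := by
  unfold pvStep
  split_ifs <;> simp [altInc_comm]

lemma foldl_pvStep_out (h : List Int) (L : List (Int × Int)) (t c : Int) (g : List Int) :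
    L.foldl (fun f p => pvStep h f p.1 p.2) (pvStep h g t c)
      = pvStep h (L.foldl (fun f p => pvStep h f p.1 p.2) g) t c := by
  induction L generalizing g with
  | nil => rfl
  | cons a L ih => simp only [List.foldl_cons, pvStep_comm h _ t c a.1 a.2, ih]

lemma fold_bump (h : List Int) (s : List Int) (c : Int → Int) (t : Int) (f : List Int)
    (hs : s.Nodup) (ht : t ∈ s) :
    (s.map (fun k => (k, c k + if k = t then 1 else 0))).foldl (fun f p => pvStep h f p.1 p.2) f
      = pvStep h ((s.map (fun k => (k, c k))).foldl (fun f p => pvStep h f p.1 p.2) f) t 1 := by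
  induction s generalizing f with
  | nil => cases ht
  | cons k s ih =>
    simp only [List.map_cons, List.foldl_cons]
    by_cases hkt : k = t
    · subst hkt
      have hts : k ∉ s := (List.nodup_cons.mp hs).1
      have hmap : s.map (fun x => (x, c x + if x = k then 1 else 0)) = s.map (fun x => (x, c x)) := by
        apply List.map_congr_left
        intro x hx
        have : x ≠ k := fun e => hts (e ▸ hx)
        simp [this]
      rw [hmap, if_pos rfl, ← pvStep_split h f k (c k) 1, foldl_pvStep_out]
    · have hts : t ∈ s := by
        rcases List.mem_cons.mp ht with h1 | h2
        · exact absurd h1.symm hkt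
        · exact h2
      simp only [if_neg hkt, add_zero]
      exact ih (pvStep h f k (c k)) (List.nodup_cons.mp hs).2 hts

lemma fold_grouped (h : List Int) (l : List Int) (f : List Int) :
    ((PySem.Set.ofList l).map (fun k => (k, (l.count k : Int)))).foldl
        (fun f p => pvStep h f p.1 p.2) f
      = l.foldl (fun f t => pvStep h f t 1) f := by
  induction l using List.reverseRecOn generalizing f with
  | nil => rfl
  | append_singleton l t ih =>
    have hof : PySem.Set.ofList (l ++ [t]) = PySem.Set.add (PySem.Set.ofList l) t := by
      rw [PySem.Set.ofList_eq_foldl, PySem.Set.ofList_eq_foldl, List.foldl_append]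
      rfl
    rw [List.foldl_append, List.foldl_cons, List.foldl_nil, hof]
    by_cases htl : t ∈ l
    · have hc : PySem.Set.contains (PySem.Set.ofList l) t = true := by
        simp [PySem.Set.contains, PySem.Set.mem_ofList, htl]
      have hadd : PySem.Set.add (PySem.Set.ofList l) t = PySem.Set.ofList l := by
        unfold PySem.Set.add
        rw [if_pos hc]
      have hmap : (PySem.Set.ofList l).map (fun k => (k, ((l ++ [t]).count k : Int)))
          = (PySem.Set.ofList l).map (fun k => (k, (l.count k : Int) + if k = t then 1 else 0)) := by
        apply List.map_congr_left
        intro x hx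
        rw [List.count_append, List.count_singleton]
        by_cases hxt : x = t
        · simp [hxt]
        · have hne : ¬ (t == x) = true := by
            simp only [beq_iff_eq]
            exact fun e => hxt e.symm
          simp [hxt, hne]
      rw [hadd, hmap,
          fold_bump h _ _ t f (PySem.Set.nodup_ofList l) ((PySem.Set.mem_ofList l t).mpr htl), ih]
    · have hc : PySem.Set.contains (PySem.Set.ofList l) t = false := by
        simp [PySem.Set.contains, PySem.Set.mem_ofList, htl]
      have hadd : PySem.Set.add (PySem.Set.ofList l) t = PySem.Set.ofList l ++ [t] := by
        unfold PySem.Set.add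
        rw [hc]
        simp
      have hct : (((l ++ [t]).count t : Nat) : Int) = 1 := by
        rw [List.count_append, List.count_eq_zero_of_not_mem htl, List.count_singleton]
        simp
      have hmap : (PySem.Set.ofList l).map (fun k => (k, ((l ++ [t]).count k : Int)))
          = (PySem.Set.ofList l).map (fun k => (k, (l.count k : Int))) := by
        apply List.map_congr_left
        intro x hx
        have hxl : x ∈ l := (PySem.Set.mem_ofList l x).mp hx
        have hxt : ¬ (t == x) = true := by
          simpa using fun e => htl ((by simpa using e : t = x) ▸ hxl)
        rw [List.count_append, List.count_singleton]
        simp [hxt]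
      rw [hadd, List.map_append, List.foldl_append, hmap]
      simp only [List.map_cons, List.map_nil, List.foldl_cons, List.foldl_nil]
      rw [hct, ih]

lemma bodyA_eq (h f : List Int) (t : Int) :
    (if PySem.Int.band t 0xF0 = 0x00 ∧ (t + 2) ∈ h then acInc f (PySem.Int.band t 0x0F - 1)
     else if PySem.Int.band t 0xF0 = 0x10 ∧ (t + 2) ∈ h then acInc f (6 + PySem.Int.band t 0x0F)
     else if PySem.Int.band t 0xF0 = 0x20 ∧ (t + 2) ∈ h then acInc f (13 + PySem.Int.band t 0x0F)
     else f) = pvStep h f t 1 := by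
  unfold pvStep acInc altInc
  split_ifs <;> first | rfl | tauto

lemma acLoop_eq (h : List Int) (fuel k : Nat) (f : List Int) (hfuel : h.length - 1 - k ≤ fuel) :
    acLoop h f k fuel = (h.dropLast.drop k).foldl (fun f t => pvStep h f t 1) f := by
  induction fuel generalizing k f with
  | zero =>
    rw [acLoop, List.drop_eq_nil_of_le (by rw [List.length_dropLast]; omega), List.foldl_nil]
  | succ fuel ih =>
    rw [acLoop]
    by_cases hc : (k : Int) ≤ (h.length : Int) - 2
    · rw [if_pos hc]
      have hklt : k < h.length := by omega
      have hk1 : k < h.dropLast.length := by rw [List.length_dropLast]; omega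
      have hget : PySem.List.pyGetD h (k : Int) 0 = h.dropLast[k] := by
        rw [List.getElem_dropLast, PySem.List.pyGetD_natCast, List.getD_eq_getElem h 0 hklt]
      rw [List.drop_eq_getElem_cons hk1, List.foldl_cons, ← ih (k + 1) _ (by omega)]
      rw [← bodyA_eq h f (h.dropLast[k]), hget]
    · rw [if_neg hc,
          List.drop_eq_nil_of_le (by rw [List.length_dropLast]; omega), List.foldl_nil]

lemma ac_eq (h : List Int) :
    ac h = h.dropLast.foldl (fun f t => pvStep h f t 1) (List.replicate 21 0) := by
  rw [ac, acLoop_eq h h.length 0 _ (by omega), List.drop_zero]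
  rfl

lemma ac_alt_eq (h : List Int) :
    ac_alt h = h.dropLast.foldl (fun f t => pvStep h f t 1) (List.replicate 21 0) := by
  have hbody : (fun (feature : List Int) (p : Int × Int) =>
      if PySem.Set.contains (PySem.Set.ofList h) (p.1 + 2) then
        if PySem.Int.band p.1 0xF0 = 0x00 then altInc feature (PySem.Int.band p.1 0x0F - 1) p.2
        else if PySem.Int.band p.1 0xF0 = 0x10 then altInc feature (6 + PySem.Int.band p.1 0x0F) p.2
        else if PySem.Int.band p.1 0xF0 = 0x20 then altInc feature (13 + PySem.Int.band p.1 0x0F) p.2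
        else feature
      else feature) = fun f p => pvStep h f p.1 p.2 := by
    funext f p
    unfold pvStep
    by_cases hm : (p.1 + 2) ∈ h <;>
      simp [PySem.Set.contains, PySem.Set.mem_ofList, hm]
  rw [ac_alt]
  simp only [PySem.List.slice_to_neg_one, PySem.Dict.foldl_insert_getD_add_one_eq_counter,
    PySem.Dict.items_counter, hbody]
  rw [fold_grouped]

-- ===== VERDICT (by name: the statement is the Claim_ definition above) =====
theorem ac_spec : Claim_equal_ac := by
  intro h _ _
  unfold Spec_ac
  rw [ac_eq, ac_alt_eq]
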